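-- pv_equiv track=rewrite | github.com/GBinion2020/AI-Phishing-Detection-WebApp | webui/report_builder.py | _panel_level
-- ===== SOURCE A (Python) =====
-- from typing import Any
--
-- def _panel_level(items: list[dict[str, Any]], force_red: bool = False, force_yellow: bool = False) -> str:
--     if force_red:
--         return "red"
--     if any(item.get("outcome") == "known_phishing_ioc" for item in items):
--         return "red"
--     if force_yellow:
--         return "yellow"
--     if any(item.get("outcome") == "could_be_malicious" for item in items):
--         return "yellow"
--     return "green"
-- ===== SOURCE B (Python) =====
-- _LEVELS = ("green", "yellow", "red")
-- _SCORE = {"known_phishing_ioc": 2, "could_be_malicious": 1}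
--
-- def _panel_level(items, force_red=False, force_yellow=False):
--     # numeric severity: max over per-item scores, seeded by the force flags,
--     # then a table lookup -- no boolean flags, no if-ladder of returns
--     sev = 2 if force_red else 1 if force_yellow else 0
--     for item in items:
--         sev = max(sev, _SCORE.get(item.get("outcome"), 0))
--     return _LEVELS[sev]
-- ===== Notes on version B (the rewrite author's own statement) =====
-- stated objective: alternative
-- what changed: Replaces A's ladder of boolean any() checks and early string returns with a numeric severity computation: each item maps to a score (2/1/0), the running maximum is seeded from the force flags, and the result is a table lookup by the final score.
import Mathlib
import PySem

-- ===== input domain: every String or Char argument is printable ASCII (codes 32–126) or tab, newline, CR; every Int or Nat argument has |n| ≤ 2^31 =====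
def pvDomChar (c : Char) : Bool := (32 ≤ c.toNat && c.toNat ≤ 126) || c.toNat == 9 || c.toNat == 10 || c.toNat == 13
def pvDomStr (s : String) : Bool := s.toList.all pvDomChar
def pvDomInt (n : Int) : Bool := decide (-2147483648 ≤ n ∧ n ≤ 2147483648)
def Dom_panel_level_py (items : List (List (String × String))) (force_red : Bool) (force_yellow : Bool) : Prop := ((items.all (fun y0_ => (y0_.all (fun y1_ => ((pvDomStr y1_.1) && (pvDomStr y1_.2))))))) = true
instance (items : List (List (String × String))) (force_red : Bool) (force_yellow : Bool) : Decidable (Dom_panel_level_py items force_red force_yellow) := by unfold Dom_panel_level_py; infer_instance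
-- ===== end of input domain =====

-- B replaces A's ladder of any() checks and early returns with a numeric severity maximum plus a table lookup (alternative decomposition, same cost).

-- ===== PORT A =====
-- item.get("outcome"): first-match association-list lookup (exact for the dict convention)
def pvGetOutcome (item : List (String × String)) : Option String :=
  (item.find? (fun kv => kv.1 == "outcome")).map (·.2)

def panel_level_py (items : List (List (String × String))) (force_red : Bool) (force_yellow : Bool) : String :=
  if force_red then "red"
  else if items.any (fun item => pvGetOutcome item == some "known_phishing_ioc") then "red"
  else if force_yellow then "yellow"
  else if items.any (fun item => pvGetOutcome item == some "could_be_malicious") then "yellow"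
  else "green"

-- ===== PORT B =====
-- _SCORE.get(item.get("outcome"), 0): the per-item numeric score
def pvScore (item : List (String × String)) : Nat :=
  match pvGetOutcome item with
  | some "known_phishing_ioc" => 2
  | some "could_be_malicious" => 1
  | _ => 0

def panel_level_py_alt (items : List (List (String × String))) (force_red : Bool) (force_yellow : Bool) : String :=
  let init : Nat := if force_red then 2 else if force_yellow then 1 else 0
  let sev := items.foldl (fun s item => max s (pvScore item)) init
  -- _LEVELS[sev]; sev ≤ 2 always, so the default is never used
  (["green", "yellow", "red"].getD sev "green")

-- ===== PRECONDITION & SPEC =====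
def Spec_panel_level_py (items : List (List (String × String))) (force_red : Bool) (force_yellow : Bool) (out : String) : Prop := out = panel_level_py_alt items force_red force_yellow
instance (items : List (List (String × String))) (force_red : Bool) (force_yellow : Bool) (out : String) : Decidable (Spec_panel_level_py items force_red force_yellow out) := by unfold Spec_panel_level_py; infer_instance

-- ===== CLAIM =====
def Claim_equal_panel_level_py : Prop := ∀ (items : List (List (String × String))) (force_red : Bool) (force_yellow : Bool), Dom_panel_level_py items force_red force_yellow → Spec_panel_level_py items force_red force_yellow (panel_level_py items force_red force_yellow)

-- ===== LEMMAS AND PROOFS =====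
-- the per-item score, phrased via the two membership tests A performs
theorem pvScore_eq (item : List (String × String)) :
    pvScore item =
      if pvGetOutcome item == some "known_phishing_ioc" then 2
      else if pvGetOutcome item == some "could_be_malicious" then 1
      else 0 := by
  unfold pvScore
  rcases h : pvGetOutcome item with _ | s
  · simp
  · by_cases hk : s = "known_phishing_ioc"
    · subst hk; simp
    · by_cases hc : s = "could_be_malicious"
      · subst hc; simp
      · simp [hk, hc]

-- B's max-fold computes the max of the seed with the score dictated by A's two any() scans
theorem pv_fold_max (items : List (List (String × String))) (init : Nat) :
    items.foldl (fun s item => max s (pvScore item)) init =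
      if items.any (fun item => pvGetOutcome item == some "known_phishing_ioc") then max init 2
      else if items.any (fun item => pvGetOutcome item == some "could_be_malicious") then max init 1
      else init := by
  induction items generalizing init with
  | nil => simp
  | cons x xs ih =>
    rw [List.foldl_cons, ih, pvScore_eq]
    cases hk : (pvGetOutcome x == some "known_phishing_ioc") <;>
    cases hc : (pvGetOutcome x == some "could_be_malicious") <;>
    cases hks : xs.any (fun item => pvGetOutcome item == some "known_phishing_ioc") <;>
    cases hcs : xs.any (fun item => pvGetOutcome item == some "could_be_malicious") <;>
      simp [hk, hc, hks, hcs] <;> omega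

-- ===== VERDICT =====
theorem panel_level_py_spec : Claim_equal_panel_level_py := by
  intro items force_red force_yellow _
  unfold Spec_panel_level_py panel_level_py panel_level_py_alt
  simp only [pv_fold_max]
  cases force_red <;> cases force_yellow <;>
    cases hk : items.any (fun item => pvGetOutcome item == some "known_phishing_ioc") <;>
    cases hc : items.any (fun item => pvGetOutcome item == some "could_be_malicious") <;>
      simp [hk, hc]
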